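-- pv_equiv track=rewrite | github.com/akapinos/vfs_scraper | news_scraper.py | extract_paragraphs
-- ===== SOURCE A (Python) =====
-- from typing import List
--
-- def extract_paragraphs(contents_list: List[dict]) -> List[str]:
--     paragraphs = []
--     for contents in contents_list:
--         paragraph = ''
--         for content in contents:
--             for c in content['content']:
--                 if 'value' in c.keys():
--                     paragraph += (c['value']).strip() + '\n'
--                     paragraph += '\n'
--                     paragraphs.append(paragraph)
--     return paragraphs
-- ===== SOURCE B (Python) =====
-- from typing import List
--
-- def extract_paragraphs(contents_list: List[dict]) -> List[str]:
--     # Gather the stripped '\n\n'-terminated pieces per group, then emit all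
--     # running prefix concatenations of that list in a second pass.
--     paragraphs = []
--     for contents in contents_list:
--         pieces = [c['value'].strip() + '\n\n'
--                   for content in contents
--                   for c in content['content']
--                   if 'value' in c]
--         paragraphs += [''.join(pieces[:i + 1]) for i in range(len(pieces))]
--     return paragraphs
-- ===== Notes on version B (the rewrite author's own statement) =====
-- stated objective: alternative
-- what changed: Instead of interleaving accumulation and appending inside the nested loops, B first gathers the stripped pieces of each group with a comprehension and then emits their running prefix concatenations in a separate pass.
-- outside the precondition, e.g. on extract_paragraphs([[{'no_content': []}]]): A raises KeyError, B raises KeyError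
import Mathlib
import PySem

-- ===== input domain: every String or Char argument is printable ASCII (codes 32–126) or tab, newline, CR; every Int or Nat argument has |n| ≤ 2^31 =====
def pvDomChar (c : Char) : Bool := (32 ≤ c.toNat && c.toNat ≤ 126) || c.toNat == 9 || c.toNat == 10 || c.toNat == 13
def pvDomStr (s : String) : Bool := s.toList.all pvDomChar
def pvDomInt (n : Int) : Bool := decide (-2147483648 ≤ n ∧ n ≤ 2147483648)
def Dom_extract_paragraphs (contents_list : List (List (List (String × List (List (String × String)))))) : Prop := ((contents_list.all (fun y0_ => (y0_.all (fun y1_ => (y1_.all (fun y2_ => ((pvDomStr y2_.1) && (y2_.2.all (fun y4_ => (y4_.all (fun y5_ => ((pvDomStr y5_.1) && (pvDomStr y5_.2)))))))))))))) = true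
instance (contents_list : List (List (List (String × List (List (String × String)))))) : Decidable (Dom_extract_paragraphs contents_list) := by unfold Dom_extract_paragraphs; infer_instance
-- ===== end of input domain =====

-- B gathers each group's stripped pieces first and then emits their running
-- prefix concatenations in a separate pass, instead of A's interleaved
-- accumulate-and-append inside the nested loops (objective: alternative).


-- ===== PORT A =====
-- inner loop "for c in content['content']: …", threading (paragraph, paragraphs)
def pvAInner : List (List (String × String)) → String × List String → String × List String
  | [], st => st
  | c :: rest, st =>
    match (PySem.Dict.mk c).get? "value" with   -- if 'value' in c.keys()
    | some v =>
      let p1 := st.1 ++ (PySem.Str.strip v ++ "\n")   -- paragraph += c['value'].strip() + '\n'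
      let p2 := p1 ++ "\n"                            -- paragraph += '\n'
      pvAInner rest (p2, st.2 ++ [p2])                -- paragraphs.append(paragraph)
    | none => pvAInner rest st

-- middle loop "for content in contents" (content['content'] raises KeyError when the
-- key is absent; Pre_ excludes that, so getD's default list is never reached there)
def pvAMid : List (List (String × List (List (String × String)))) → String × List String → String × List String
  | [], st => st
  | content :: rest, st =>
      pvAMid rest (pvAInner ((PySem.Dict.mk content).getD "content" []) st)

def extract_paragraphs (contents_list : List (List (List (String × List (List (String × String)))))) : List String :=
  contents_list.foldl (fun paragraphs contents => (pvAMid contents ("", paragraphs)).2) []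

-- ===== PORT B =====
-- the comprehension piece "c['value'].strip() + '\n\n'" guarded by "'value' in c"
def pvPiece? (c : List (String × String)) : Option String :=
  ((PySem.Dict.mk c).get? "value").map (fun v => PySem.Str.strip v ++ "\n\n")

-- pieces = [... for content in contents for c in content['content'] if 'value' in c]
def pvPieces (contents : List (List (String × List (List (String × String))))) : List String :=
  contents.flatMap (fun content => ((PySem.Dict.mk content).getD "content" []).filterMap pvPiece?)

-- paragraphs += [''.join(pieces[:i + 1]) for i in range(len(pieces))]
def extract_paragraphs_alt (contents_list : List (List (List (String × List (List (String × String)))))) : List String :=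
  contents_list.foldl (fun paragraphs contents =>
    let pieces := pvPieces contents
    paragraphs ++ (List.range pieces.length).map (fun i => PySem.Str.join "" (pieces.take (i + 1)))) []

-- ===== PRECONDITION & SPEC =====
-- Pre_ excludes exactly the inputs where A raises KeyError: some content dict lacking the 'content' key.
def Pre_extract_paragraphs (contents_list : List (List (List (String × List (List (String × String)))))) : Prop :=
  ∀ contents ∈ contents_list, ∀ content ∈ contents, (PySem.Dict.mk content).contains "content" = true
instance (contents_list : List (List (List (String × List (List (String × String)))))) : Decidable (Pre_extract_paragraphs contents_list) := by unfold Pre_extract_paragraphs; infer_instance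

def pvWitness_extract_paragraphs : (List (List (List (String × List (List (String × String)))))) :=
  [[[("content", [[("value", " hi ")], [("x", "y")]])]]]

def Spec_extract_paragraphs (contents_list : List (List (List (String × List (List (String × String)))))) (out : List String) : Prop := out = extract_paragraphs_alt contents_list
instance (contents_list : List (List (List (String × List (List (String × String)))))) (out : List String) : Decidable (Spec_extract_paragraphs contents_list out) := by unfold Spec_extract_paragraphs; infer_instance

-- ===== CLAIM (what is proved, stated in full; the proofs are below) =====
def Claim_equal_extract_paragraphs : Prop := ∀ (contents_list : List (List (List (String × List (List (String × String)))))), Dom_extract_paragraphs contents_list → Pre_extract_paragraphs contents_list → Spec_extract_paragraphs contents_list (extract_paragraphs contents_list)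

-- ===== LEMMAS AND PROOFS =====

-- running prefix concatenations starting from p (proof-only characterisation)
def pvScan (p : String) : List String → List String
  | [] => []
  | s :: rest => (p ++ s) :: pvScan (p ++ s) rest

theorem pv_join_nil : PySem.Str.join "" [] = "" := rfl

theorem pv_join_cons (x : String) (rest : List String) :
    PySem.Str.join "" (x :: rest) = x ++ PySem.Str.join "" rest := by
  cases rest with
  | nil => simp [PySem.Str.join, PySem.Chars.join_singleton]
  | cons y r => simp [PySem.Str.join, PySem.Chars.join_cons_cons]

theorem pvScan_append (xs ys : List String) : ∀ p,
    pvScan p (xs ++ ys) = pvScan p xs ++ pvScan (xs.foldl (· ++ ·) p) ys := by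
  induction xs with
  | nil => intro p; simp [pvScan]
  | cons x rest ih => intro p; simp [pvScan, List.foldl_cons, ih]

theorem pvAInner_eq (cs : List (List (String × String))) : ∀ p out,
    pvAInner cs (p, out) =
      ((cs.filterMap pvPiece?).foldl (· ++ ·) p, out ++ pvScan p (cs.filterMap pvPiece?)) := by
  induction cs with
  | nil => intro p out; simp [pvAInner, pvScan]
  | cons c rest ih =>
    intro p out
    cases h : (PySem.Dict.mk c).get? "value" with
    | none =>
      have hp : pvPiece? c = none := by simp [pvPiece?, h]
      simp [pvAInner, h, hp, ih]
    | some v =>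
      have hp : pvPiece? c = some (PySem.Str.strip v ++ "\n\n") := by simp [pvPiece?, h]
      have hstr : (p ++ (PySem.Str.strip v ++ "\n")) ++ "\n"
          = p ++ (PySem.Str.strip v ++ "\n\n") := by
        rw [String.append_assoc, String.append_assoc]; rfl
      simp only [pvAInner, h, hp, List.filterMap_cons, List.foldl_cons, pvScan, hstr, ih]
      simp

theorem pvAMid_eq (contents : List (List (String × List (List (String × String))))) : ∀ p out,
    pvAMid contents (p, out) =
      ((pvPieces contents).foldl (· ++ ·) p, out ++ pvScan p (pvPieces contents)) := by
  induction contents with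
  | nil => intro p out; simp [pvAMid, pvPieces, pvScan]
  | cons content rest ih =>
    intro p out
    simp only [pvAMid, pvAInner_eq, ih, pvPieces, List.flatMap_cons, List.foldl_append,
      pvScan_append, List.append_assoc]

theorem pvScan_eq_map (xs : List String) : ∀ p,
    pvScan p xs = (List.range xs.length).map
      (fun i => p ++ PySem.Str.join "" (xs.take (i + 1))) := by
  induction xs with
  | nil => intro p; simp [pvScan]
  | cons x rest ih =>
    intro p
    simp only [pvScan, List.length_cons, List.range_succ_eq_map, List.map_cons, List.map_map]
    congr 1
    · rw [List.take_succ_cons, List.take_zero, pv_join_cons, pv_join_nil,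
        String.append_empty]
    · rw [ih (p ++ x)]
      apply List.map_congr_left
      intro i _
      simp only [Function.comp_apply, Nat.succ_eq_add_one, List.take_succ_cons, pv_join_cons,
        ← String.append_assoc]

theorem pv_step_eq (out : List String) (contents : List (List (String × List (List (String × String))))) :
    (pvAMid contents ("", out)).2 =
      out ++ (List.range (pvPieces contents).length).map
        (fun i => PySem.Str.join "" ((pvPieces contents).take (i + 1))) := by
  rw [pvAMid_eq, pvScan_eq_map]
  simp [String.empty_append]

-- ===== VERDICT (by name: the statement is the Claim_ definition above) =====
theorem extract_paragraphs_spec : Claim_equal_extract_paragraphs := by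
  intro contents_list _ _
  unfold Spec_extract_paragraphs extract_paragraphs extract_paragraphs_alt
  have h : (fun (paragraphs : List String) contents => (pvAMid contents ("", paragraphs)).2)
      = (fun (paragraphs : List String) contents =>
          let pieces := pvPieces contents
          paragraphs ++ (List.range pieces.length).map
            (fun i => PySem.Str.join "" (pieces.take (i + 1)))) := by
    funext out contents
    exact pv_step_eq out contents
  rw [h]
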